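-- pv_equiv track=rewrite | github.com/karen-yang/word_cloud_messenger | main.py | seperate_message
-- ===== SOURCE A (Python) =====
-- def seperate_message(s, names):
--     ignores = ['Dec', 'Nov', 'Oct' ,
--                'Sep ','Aug ', 'Jul ',
--                'Jun ', 'May ','Apr ',
--                'Mar ','Feb ', 'Jan ',
--                'https://'] + list(names)
--     for m in ignores:
--         i = s.find(m)
--         if i != -1:
--             s =  s[:i]
--     return s
-- ===== SOURCE B (Python) =====
-- def seperate_message(s, names):
--     markers = ['Dec', 'Nov', 'Oct',
--                'Sep ', 'Aug ', 'Jul ',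
--                'Jun ', 'May ', 'Apr ',
--                'Mar ', 'Feb ', 'Jan ',
--                'https://'] + list(names)
--     # Occurrences of a marker come in increasing positions, so the first occurrence
--     # in the original s either lies entirely below the current cut or no occurrence does.
--     cut = len(s)
--     for m in markers:
--         p = s.find(m)
--         if p != -1 and p + len(m) <= cut:
--             cut = p
--     return s[:cut]
-- ===== Notes on version B (the rewrite author's own statement) =====
-- stated objective: simpler
-- what changed: A repeatedly truncates the string and re-searches each shrinking copy; B never slices until the end: it keeps a single cut index and, per marker, does one find on the original string plus a fits-below-cut test (valid because a marker's occurrences are increasing, so only its first occurrence can fit).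
import Mathlib
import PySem

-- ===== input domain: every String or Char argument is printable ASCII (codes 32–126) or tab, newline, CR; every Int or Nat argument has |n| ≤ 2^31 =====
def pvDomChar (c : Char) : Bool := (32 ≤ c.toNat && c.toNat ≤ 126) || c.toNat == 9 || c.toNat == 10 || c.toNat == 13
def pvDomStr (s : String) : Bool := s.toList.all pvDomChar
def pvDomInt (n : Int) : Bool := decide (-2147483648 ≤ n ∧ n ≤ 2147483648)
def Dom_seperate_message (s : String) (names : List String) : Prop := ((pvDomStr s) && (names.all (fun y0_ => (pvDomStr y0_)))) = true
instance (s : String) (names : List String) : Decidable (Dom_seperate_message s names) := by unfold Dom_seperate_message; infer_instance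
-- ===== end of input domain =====

-- B keeps one cut index over the ORIGINAL string instead of repeated truncation and re-search;
-- equivalence is about the return value (neither program mutates its arguments).

-- the literal 'ignores' prefix shared by both Pythons
def pvMarkers (names : List String) : List String :=
  ["Dec", "Nov", "Oct",
   "Sep ", "Aug ", "Jul ",
   "Jun ", "May ", "Apr ",
   "Mar ", "Feb ", "Jan ",
   "https://"] ++ names

-- ===== PORT A =====
-- A: for each marker, s.find(m); if found, s = s[:i]; return s.
def seperate_message (s : String) (names : List String) : String :=
  String.ofList ((pvMarkers names).foldl (fun cs m =>
    let i := PySem.Chars.find cs m.toList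
    if i ≠ -1 then PySem.List.slice cs (none) (some i) else cs) s.toList)

-- ===== PORT B =====
-- B's loop body: one find on the original string plus the fits-below-cut test
def pvStep (cs : List Char) (cut : Nat) (m : List Char) : Nat :=
  let p := PySem.Chars.find cs m
  if p ≠ -1 ∧ p + (m.length : Int) ≤ (cut : Int) then p.toNat else cut

def seperate_message_alt (s : String) (names : List String) : String :=
  let cs := s.toList
  let cut := (pvMarkers names).foldl (fun cut m => pvStep cs cut m.toList) cs.length
  String.ofList (cs.take cut)

-- ===== PRECONDITION & SPEC =====
def Spec_seperate_message (s : String) (names : List String) (out : String) : Prop := out = seperate_message_alt s names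
instance (s : String) (names : List String) (out : String) : Decidable (Spec_seperate_message s names out) := by unfold Spec_seperate_message; infer_instance

-- ===== CLAIM (what is proved, stated in full; the proofs are below) =====
def Claim_equal_seperate_message : Prop := ∀ (s : String) (names : List String), Dom_seperate_message s names → Spec_seperate_message s names (seperate_message s names)

-- ===== LEMMAS AND PROOFS =====

lemma pvStep_le (cs m : List Char) (cut : Nat) : pvStep cs cut m ≤ cut := by
  simp only [pvStep]
  split_ifs with hc
  · have := PySem.Chars.neg_one_le_find cs m
    omega
  · exact le_rfl

-- an occurrence of m in the original cs that fits below cut is an occurrence in the prefix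
lemma pvOcc_bwd (cs m : List Char) (cut p : Nat)
    (h1 : (cs.drop p).take m.length = m) (h2 : p + m.length ≤ cut) :
    m <+: (cs.take cut).drop p := by
  rw [List.drop_take, List.prefix_iff_eq_take, List.take_take, min_eq_left (by omega)]
  exact h1.symm

-- and conversely (for p below the cut)
lemma pvOcc_fwd (cs m : List Char) (cut p : Nat) (hp : p ≤ cut)
    (hpfx : m <+: (cs.take cut).drop p) :
    (cs.drop p).take m.length = m ∧ p + m.length ≤ cut := by
  rw [List.drop_take] at hpfx
  have hlen : m.length ≤ ((cs.drop p).take (cut - p)).length := hpfx.length_le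
  simp only [List.length_take, List.length_drop] at hlen
  have hml : m.length ≤ cut - p := le_trans hlen (min_le_left _ _)
  refine ⟨?_, by omega⟩
  have := List.prefix_iff_eq_take.mp hpfx
  rw [List.take_take, min_eq_left hml] at this
  exact this.symm

-- one marker: A's truncation of the prefix equals taking B's new cut of the original
lemma pvStep_eq (cs m : List Char) (cut : Nat) (h : cut ≤ cs.length) :
    (if PySem.Chars.find (cs.take cut) m ≠ -1
     then PySem.List.slice (cs.take cut) (none) (some (PySem.Chars.find (cs.take cut) m))
     else cs.take cut)
    = cs.take (pvStep cs cut m) := by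
  have ht : (cs.take cut).length = cut := by simp [List.length_take]; omega
  unfold pvStep
  by_cases hf : PySem.Chars.find (cs.take cut) m = -1
  · -- no occurrence in the prefix: B's fit test must fail too
    have hno : ¬ m <:+: cs.take cut := (PySem.Chars.find_eq_neg_one_iff _ m).mp hf
    have hcond : ¬ (PySem.Chars.find cs m ≠ -1 ∧ PySem.Chars.find cs m + (m.length : Int) ≤ (cut : Int)) := by
      rintro ⟨hne, hfit⟩
      have hnn : 0 ≤ PySem.Chars.find cs m := by
        have := PySem.Chars.neg_one_le_find cs m; omega
      obtain ⟨hq1, -⟩ := PySem.Chars.find_spec hnn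
      have h1 : (cs.drop (PySem.Chars.find cs m).toNat).take m.length = m :=
        (List.prefix_iff_eq_take.mp hq1).symm
      have h2 : (PySem.Chars.find cs m).toNat + m.length ≤ cut := by omega
      exact hno (List.IsInfix.trans (pvOcc_bwd cs m cut _ h1 h2).isInfix
        (List.drop_suffix _ (cs.take cut)).isInfix)
    simp [hf, hcond]
  · -- occurrence in the prefix: it is cs's first occurrence, and it fits
    have hinf : m <:+: cs.take cut := by
      by_contra hc
      exact hf ((PySem.Chars.find_eq_neg_one_iff _ m).mpr hc)
    have hnn : 0 ≤ PySem.Chars.find (cs.take cut) m := (PySem.Chars.find_nonneg_iff _ m).mpr hinf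
    obtain ⟨hf1, hf2⟩ := PySem.Chars.find_spec hnn
    have hle := PySem.Chars.find_le_length (cs.take cut) m
    have hfle : (PySem.Chars.find (cs.take cut) m).toNat ≤ cut := by rw [ht] at hle; omega
    obtain ⟨h1, h2⟩ := pvOcc_fwd cs m cut _ hfle hf1
    -- so cs has an occurrence at f.toNat
    have hcs_occ : m <+: cs.drop (PySem.Chars.find (cs.take cut) m).toNat :=
      List.prefix_iff_eq_take.mpr h1.symm
    have hne : PySem.Chars.find cs m ≠ -1 := by
      rw [PySem.Chars.find_ne_neg_one_iff]
      exact List.IsInfix.trans hcs_occ.isInfix (List.drop_suffix _ cs).isInfix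
    have hqnn : 0 ≤ PySem.Chars.find cs m := by
      have := PySem.Chars.neg_one_le_find cs m; omega
    obtain ⟨hq1, hq2⟩ := PySem.Chars.find_spec hqnn
    -- q ≤ f: q is the first occurrence in cs
    have hqf : (PySem.Chars.find cs m).toNat ≤ (PySem.Chars.find (cs.take cut) m).toNat := by
      by_contra hc
      exact hq2 _ (by omega) hcs_occ
    -- f ≤ q: q's occurrence fits below cut, hence appears in the prefix
    have hq1' : (cs.drop (PySem.Chars.find cs m).toNat).take m.length = m :=
      (List.prefix_iff_eq_take.mp hq1).symm
    have hfq : (PySem.Chars.find (cs.take cut) m).toNat ≤ (PySem.Chars.find cs m).toNat := by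
      by_contra hc
      exact hf2 _ (by omega) (pvOcc_bwd cs m cut _ hq1' (by omega))
    have hcond : PySem.Chars.find cs m ≠ -1 ∧ PySem.Chars.find cs m + (m.length : Int) ≤ (cut : Int) := by
      constructor
      · exact hne
      · omega
    simp only [hf, ne_eq, not_false_iff, if_true, if_pos hcond]
    rw [PySem.List.slice_to _ hnn, List.take_take, min_eq_left hfle]
    -- cs.take f.toNat = cs.take q.toNat since f.toNat = q.toNat
    congr 1
    omega

lemma pvFold_eq (cs : List Char) (ms : List String) (cut : Nat) (h : cut ≤ cs.length) :
    ms.foldl (fun t m =>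
      let i := PySem.Chars.find t m.toList
      if i ≠ -1 then PySem.List.slice t (none) (some i) else t) (cs.take cut)
    = cs.take (ms.foldl (fun c m => pvStep cs c m.toList) cut)
    := by
  induction ms generalizing cut with
  | nil => simp
  | cons m ms ih =>
    simp only [List.foldl_cons]
    rw [pvStep_eq cs m.toList cut h]
    exact ih _ (le_trans (pvStep_le cs m.toList cut) h)

-- ===== VERDICT (by name: the statement is the Claim_ definition above) =====
theorem seperate_message_spec : Claim_equal_seperate_message := by
  intro s names _
  unfold Spec_seperate_message seperate_message seperate_message_alt
  have := pvFold_eq s.toList (pvMarkers names) s.toList.length le_rfl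
  simp only [List.take_length] at this
  rw [this]
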